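-- pv_equiv track=rewrite | github.com/Blue-Cheesecake/_-Depreciated-_My-Playground | Intermediete/Test_MinimumMakeStringAnagram.py | Solution
-- ===== SOURCE A (Python) =====
-- def frequency(lists):
--     freq = {}
--     for i in lists:
--         if i not in freq:
--             freq[i] = 1
--         else:
--             freq[i] += 1
--     return freq
--
-- def Solution(s=str, t=str):
--     freqS = frequency(s)
--     freqT = frequency(t)
--     freqS = sorted(freqS.items(), key=lambda kv: kv[0])
--     freqT = sorted(freqT.items(), key=lambda kv: kv[0])
--     count = 0
--     for i in freqT:
--         if i[0] not in s:
--             count += i[1]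
--         else:
--             # if i[0] value more than original, count += 1
--             # indx is i[0] in freqS
--             indx = 0
--             while indx <= len(freqS):
--                 if i[0] in freqS[indx]:
--                     break
--                 indx += 1
--             if i[1] > freqS[indx][1]:
--                 count += i[1] - freqS[indx][1]
--     return count
-- ===== SOURCE B (Python) =====
-- def Solution(s=str, t=str):
--     # Consume a mutable multiset of s while streaming t: no frequency table of t,
--     # no sorting, no per-character substring scan of s.
--     remaining = {}
--     for c in s:
--         remaining[c] = remaining.get(c, 0) + 1
--     count = 0
--     for c in t:
--         if remaining.get(c, 0) > 0:
--             remaining[c] = remaining[c] - 1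
--         else:
--             count += 1
--     return count
-- ===== Notes on version B (the rewrite author's own statement) =====
-- stated objective: simpler
-- what changed: Instead of building both frequency tables, sorting their item lists and, for each distinct char of t, scanning s for membership and linearly searching the sorted s-items, B builds one counter of s and makes a single consuming pass over t, decrementing remaining counts and counting misses.
import Mathlib
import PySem

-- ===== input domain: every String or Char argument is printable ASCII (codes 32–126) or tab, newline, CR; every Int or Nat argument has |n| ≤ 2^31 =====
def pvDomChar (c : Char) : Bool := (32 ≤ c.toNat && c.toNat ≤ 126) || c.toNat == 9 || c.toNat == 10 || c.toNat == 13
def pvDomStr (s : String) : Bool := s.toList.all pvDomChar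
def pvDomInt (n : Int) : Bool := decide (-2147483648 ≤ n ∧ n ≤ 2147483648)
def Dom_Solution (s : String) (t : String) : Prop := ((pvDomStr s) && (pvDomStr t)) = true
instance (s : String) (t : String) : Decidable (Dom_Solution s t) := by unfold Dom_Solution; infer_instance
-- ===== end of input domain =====

-- B replaces A's two sorted frequency tables, per-key substring test and per-key linear
-- search by one consuming pass of t over a counter of s (objective: simpler).

-- ===== PORT A =====
def frequency (l : List Char) : PySem.Dict Char Int :=
  l.foldl (fun d c => if d.contains c = false then d.insert c 1 else d.modify c 0 (· + 1))
    PySem.Dict.empty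

-- the 'while indx <= len(freqS)' linear scan; 'i[0] in freqS[indx]' is tuple membership,
-- and a Char can only equal the key component (the value is an int)
def findIn : List (Char × Int) → Char → Option (Char × Int)
  | [], _ => none
  | p :: rest, c => if p.1 = c then some p else findIn rest c

def Solution (s : String) (t : String) : Int :=
  let freqS := PySem.List.sorted (frequency s.toList).items (fun kv => kv.1) false
  let freqT := PySem.List.sorted (frequency t.toList).items (fun kv => kv.1) false
  freqT.foldl (fun count i =>
    -- 'i[0] not in s': single-character substring test = character membership
    if s.toList.contains i.1 = false then count + i.2
    else match findIn freqS i.1 with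
      | some q => if i.2 > q.2 then count + (i.2 - q.2) else count
      | none => count  -- unreachable: Python would raise IndexError, but i.1 ∈ s guarantees a hit
    ) 0

-- ===== PORT B =====
def Solution_alt (s : String) (t : String) : Int :=
  let remaining := s.toList.foldl (fun d c => d.insert c (d.getD c 0 + 1)) PySem.Dict.empty
  (t.toList.foldl (fun (st : PySem.Dict Char Int × Int) c =>
      if st.1.getD c 0 > 0 then (st.1.insert c (st.1.getD c 0 - 1), st.2)
      else (st.1, st.2 + 1)) (remaining, 0)).2

-- ===== PRECONDITION & SPEC =====
def Spec_Solution (s : String) (t : String) (out : Int) : Prop := out = Solution_alt s t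
instance (s : String) (t : String) (out : Int) : Decidable (Spec_Solution s t out) := by unfold Spec_Solution; infer_instance

-- ===== CLAIM (what is proved, stated in full; the proofs are below) =====
def Claim_equal_Solution : Prop := ∀ (s : String) (t : String), Dom_Solution s t → Spec_Solution s t (Solution s t)

-- ===== LEMMAS AND PROOFS =====

theorem frequency_eq_counter (l : List Char) : frequency l = PySem.Dict.counter l := by
  rw [frequency, PySem.Dict.counter_eq_foldl]
  apply List.foldl_ext
  intro d c _
  by_cases h : d.contains c = false
  · simp [PySem.Dict.modify, h, PySem.Dict.getD_of_not_contains _ _ h]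
  · simp [h]

theorem findIn_eq_some (L : List (Char × Int)) (c : Char) (v : Int)
    (hmem : (c, v) ∈ L) (huniq : ∀ p ∈ L, p.1 = c → p.2 = v) :
    findIn L c = some (c, v) := by
  induction L with
  | nil => simp at hmem
  | cons p rest ih =>
    by_cases h : p.1 = c
    · have : p = (c, v) := by
        have := huniq p (by simp) h
        cases p; simp_all
      simp [findIn, this]
    · rcases List.mem_cons.mp hmem with h1 | h1
      · exact absurd (by rw [← h1]) h
      · simp only [findIn, h, if_false]
        exact ih h1 (fun q hq => huniq q (by simp [hq]))

-- common specification: over each distinct character of t, the excess of t's count over s's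
def F (s t : String) : Int :=
  ∑ c ∈ t.toList.toFinset, max 0 ((t.toList.count c : Int) - (s.toList.count c : Int))

-- the per-item contribution of A's main loop
def gA (s : String) (p : Char × Int) : Int :=
  if s.toList.contains p.1 = false then p.2
  else match findIn (PySem.List.sorted (PySem.Dict.counter s.toList).items (fun kv => kv.1) false) p.1 with
    | some q => if p.2 > q.2 then p.2 - q.2 else 0
    | none => 0

theorem gA_eq (s : String) (c : Char) (tc : Nat) :
    gA s (c, (tc : Int)) = max 0 ((tc : Int) - (s.toList.count c : Int)) := by
  unfold gA
  by_cases hc : c ∈ s.toList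
  · have hcon : s.toList.contains c = true := by simpa using hc
    have hmem : (c, (s.toList.count c : Int)) ∈
        PySem.List.sorted (PySem.Dict.counter s.toList).items (fun kv => kv.1) false := by
      rw [PySem.List.mem_sorted, PySem.Dict.items_counter]
      exact List.mem_map.mpr ⟨c, (PySem.Set.mem_ofList _ _).mpr hc, rfl⟩
    have huniq : ∀ p ∈ PySem.List.sorted (PySem.Dict.counter s.toList).items (fun kv => kv.1) false,
        p.1 = c → p.2 = (s.toList.count c : Int) := by
      intro p hp hpc
      rw [PySem.List.mem_sorted, PySem.Dict.items_counter] at hp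
      obtain ⟨k, _, rfl⟩ := List.mem_map.mp hp
      simp only at hpc
      subst hpc; rfl
    rw [findIn_eq_some _ c _ hmem huniq, if_neg (by rw [hcon]; simp)]
    dsimp only
    split_ifs with h <;> omega
  · have hcon : s.toList.contains c = false := by simpa using hc
    rw [List.count_eq_zero.mpr hc, if_pos hcon]
    omega

theorem A_eq_F (s t : String) : Solution s t = F s t := by
  simp only [Solution, frequency_eq_counter]
  refine Eq.trans (List.foldl_ext _ (fun count i => count + gA s i) 0 ?_) ?_
  · intro count p _
    unfold gA
    dsimp only
    by_cases h : s.toList.contains p.1 = false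
    · rw [if_pos h, if_pos h]
    · rw [if_neg h, if_neg h]
      cases findIn (PySem.List.sorted (PySem.Dict.counter s.toList).items
          (fun kv => kv.1) false) p.1 with
      | none => ring
      | some q =>
        dsimp only
        split_ifs <;> ring
  rw [PySem.List.foldl_add, zero_add]
  have hperm : ((PySem.List.sorted (PySem.Dict.counter t.toList).items (fun kv => kv.1) false).map (gA s)).Perm
      ((PySem.Dict.counter t.toList).items.map (gA s)) :=
    (PySem.List.sorted_perm _ _ _).map _
  rw [hperm.sum_eq, PySem.Dict.items_counter, List.map_map]
  have hcongr : ∀ c ∈ PySem.Set.ofList t.toList,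
      (gA s ∘ fun k => (k, (t.toList.count k : Int))) c
        = max 0 ((t.toList.count c : Int) - (s.toList.count c : Int)) := by
    intro c _
    exact gA_eq s c _
  rw [List.map_congr_left hcongr]
  have hfin : (PySem.Set.ofList t.toList).toFinset = t.toList.toFinset := by
    ext x; simp [PySem.Set.mem_ofList]
  rw [F, ← hfin, List.sum_toFinset _ (PySem.Set.nodup_ofList _)]

def needD : List Char → PySem.Dict Char Int → Int
  | [], _ => 0
  | c :: rest, d =>
      if d.getD c 0 > 0 then needD rest (d.insert c (d.getD c 0 - 1)) else 1 + needD rest d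

theorem Bwrap (l : List Char) (d : PySem.Dict Char Int) (k : Int) :
    (l.foldl (fun (st : PySem.Dict Char Int × Int) c =>
      if st.1.getD c 0 > 0 then (st.1.insert c (st.1.getD c 0 - 1), st.2)
      else (st.1, st.2 + 1)) (d, k)).2 = k + needD l d := by
  induction l generalizing d k with
  | nil => simp [needD]
  | cons c rest ih =>
    rw [List.foldl_cons, needD]
    by_cases h : d.getD c 0 > 0
    · simp only [h, if_true]
      rw [ih]
    · simp only [h, if_false]
      rw [ih]
      ring

theorem needD_spec (l : List Char) : ∀ d : PySem.Dict Char Int, (∀ c, 0 ≤ d.getD c 0) →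
    needD l d = ∑ c ∈ l.toFinset, max 0 ((l.count c : Int) - d.getD c 0) := by
  induction l with
  | nil => simp [needD]
  | cons c rest ih =>
    intro d hd
    rw [needD, List.toFinset_cons]
    by_cases h : d.getD c 0 > 0
    · rw [if_pos h, ih _ (fun x => by
        rw [PySem.Dict.getD_insert]
        split_ifs with hx
        · omega
        · exact hd x)]
      simp only [PySem.Dict.getD_insert]
      by_cases hcT : c ∈ rest.toFinset
      · rw [Finset.insert_eq_self.mpr hcT]
        apply Finset.sum_congr rfl
        intro x _
        by_cases hxc : x = c
        · subst hxc
          rw [List.count_cons_self, if_pos rfl]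
          push_cast; omega
        · rw [List.count_cons_of_ne (Ne.symm hxc), if_neg hxc]
      · rw [Finset.sum_insert (by simpa using hcT)]
        have hc0 : rest.count c = 0 := List.count_eq_zero.mpr (by simpa using hcT)
        have hterm : max 0 ((List.count c (c :: rest) : Int) - d.getD c 0) = 0 := by
          rw [List.count_cons_self, hc0]
          push_cast; omega
        rw [hterm, zero_add]
        apply Finset.sum_congr rfl
        intro x hx
        have hxc : x ≠ c := fun hh => hcT (hh ▸ hx)
        rw [List.count_cons_of_ne (Ne.symm hxc), if_neg hxc]
    · rw [if_neg h, ih d hd]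
      have hd0 : d.getD c 0 = 0 := le_antisymm (by omega) (hd c)
      by_cases hcT : c ∈ rest.toFinset
      · rw [Finset.insert_eq_self.mpr hcT,
            ← Finset.add_sum_erase _ _ hcT, ← Finset.add_sum_erase _ _ hcT]
        have hsums : ∀ x ∈ rest.toFinset.erase c,
            max 0 ((List.count x (c :: rest) : Int) - d.getD x 0)
              = max 0 ((rest.count x : Int) - d.getD x 0) := by
          intro x hx
          have hxc : x ≠ c := (Finset.mem_erase.mp hx).1
          rw [List.count_cons_of_ne (Ne.symm hxc)]
        rw [Finset.sum_congr rfl hsums]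
        rw [List.count_cons_self, hd0]
        push_cast; omega
      · rw [Finset.sum_insert (by simpa using hcT)]
        have hc0 : rest.count c = 0 := List.count_eq_zero.mpr (by simpa using hcT)
        have hsums : ∀ x ∈ rest.toFinset,
            max 0 ((List.count x (c :: rest) : Int) - d.getD x 0)
              = max 0 ((rest.count x : Int) - d.getD x 0) := by
          intro x hx
          have hxc : x ≠ c := fun hh => hcT (hh ▸ hx)
          rw [List.count_cons_of_ne (Ne.symm hxc)]
        rw [Finset.sum_congr rfl hsums]
        rw [List.count_cons_self, hc0, hd0]
        push_cast; omega

theorem B_eq_F (s t : String) : Solution_alt s t = F s t := by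
  simp only [Solution_alt, PySem.Dict.foldl_insert_getD_add_one_eq_counter]
  rw [Bwrap, needD_spec _ _ (fun c => by rw [PySem.Dict.getD_counter]; positivity), zero_add]
  simp only [PySem.Dict.getD_counter, F]

-- ===== VERDICT (by name: the statement is the Claim_ definition above) =====
theorem Solution_spec : Claim_equal_Solution := by
  intro s t _
  unfold Spec_Solution
  rw [A_eq_F, B_eq_F]
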